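-- pv_equiv track=rewrite | github.com/weirdname404/courses | algorithms/warmup/fib_sum_sq_ld.py | fib_mod_sum
-- ===== SOURCE A (Python) =====
-- def fib_mod_sum(n):
--     mod_seq = [0, 1]
--     # mod is 10 -> pisano period is 60
--     pp = 60
--     fib_i = n % pp
--
--     for _ in range(1, fib_i):
--         mod_seq.append((mod_seq[-1] + mod_seq[-2]))
--
--     fn_seq = mod_seq[:fib_i + 1]
--
--     return sum([i**2 for i in fn_seq]) % 10
-- ===== SOURCE B (Python) =====
-- def fib_mod_sum(n):
--     # sum_{i=0}^{m} F(i)^2 = F(m)*F(m+1); Pisano period of 10 is 60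
--     m = n % 60
--     a, b = 0, 1
--     for _ in range(m):
--         a, b = b, a + b
--     return (a * b) % 10
-- ===== Notes on version B (the rewrite author's own statement) =====
-- stated objective: simpler
-- what changed: Replaces building the Fibonacci list, slicing it and summing a list of squares with a single (a,b) pair iteration and the identity sum F(i)^2 = F(m)*F(m+1).
import Mathlib
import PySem

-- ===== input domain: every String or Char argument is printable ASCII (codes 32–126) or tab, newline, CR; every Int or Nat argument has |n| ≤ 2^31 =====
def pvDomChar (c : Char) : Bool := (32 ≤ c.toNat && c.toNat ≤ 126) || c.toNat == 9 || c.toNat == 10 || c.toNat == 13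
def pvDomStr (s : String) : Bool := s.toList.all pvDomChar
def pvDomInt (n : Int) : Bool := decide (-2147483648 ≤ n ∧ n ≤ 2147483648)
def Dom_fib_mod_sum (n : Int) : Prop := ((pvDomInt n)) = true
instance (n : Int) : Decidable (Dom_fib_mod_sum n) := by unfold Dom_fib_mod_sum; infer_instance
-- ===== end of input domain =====

-- B replaces list-building + slice + sum-of-squares with a constant-space (a,b) pair
-- iteration and the identity sum_{i<=m} F(i)^2 = F(m)*F(m+1) (objective: simpler).

-- ===== PORT A =====
-- the body of A after 'fib_i = n % pp' is computed, as a function of fib_i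
def pvACore (fib_i : Int) : Int :=
  let mod_seq : List Int :=
    (PySem.List.pyRange 1 fib_i 1).foldl
      (fun seq _ => seq ++ [PySem.List.pyGetD seq (-1) 0 + PySem.List.pyGetD seq (-2) 0])
      [0, 1]
  let fn_seq := PySem.List.slice mod_seq none (some (fib_i + 1))
  PySem.Int.mod ((fn_seq.map (fun i => i ^ 2)).sum) 10

def fib_mod_sum (n : Int) : Int := pvACore (PySem.Int.mod n 60)

-- ===== PORT B =====
def pvBCore (m : Int) : Int :=
  let ab := (PySem.List.pyRange 0 m 1).foldl (fun (ab : Int × Int) _ => (ab.2, ab.1 + ab.2)) (0, 1)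
  PySem.Int.mod (ab.1 * ab.2) 10

def fib_mod_sum_alt (n : Int) : Int := pvBCore (PySem.Int.mod n 60)

-- ===== PRECONDITION & SPEC =====
def Spec_fib_mod_sum (n : Int) (out : Int) : Prop := out = fib_mod_sum_alt n
instance (n : Int) (out : Int) : Decidable (Spec_fib_mod_sum n out) := by unfold Spec_fib_mod_sum; infer_instance

-- ===== CLAIM (what is proved, stated in full; the proofs are below) =====
def Claim_equal_fib_mod_sum : Prop := ∀ (n : Int), Dom_fib_mod_sum n → Spec_fib_mod_sum n (fib_mod_sum n)

-- ===== LEMMAS AND PROOFS =====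
theorem pvCore_eq (m : Int) (h0 : 0 ≤ m) (h1 : m < 60) : pvACore m = pvBCore m := by
  interval_cases m <;> decide

-- ===== VERDICT (by name: the statement is the Claim_ definition above) =====
theorem fib_mod_sum_spec : Claim_equal_fib_mod_sum := by
  intro n _
  show fib_mod_sum n = fib_mod_sum_alt n
  unfold fib_mod_sum fib_mod_sum_alt
  rw [PySem.Int.mod_eq_emod_of_pos (by norm_num)]
  exact pvCore_eq _ (Int.emod_nonneg n (by norm_num)) (Int.emod_lt_of_pos n (by norm_num))
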